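-- pv_equiv track=rewrite | github.com/Cantara/knowledge-context-protocol | bridge/python/kcp_mcp/mapper.py | map_audience
-- ===== SOURCE A (Python) =====
-- def map_audience(audience: list[str]) -> list[str]:
--     """Map KCP audience values to MCP Role values ('user' / 'assistant')."""
--     roles: set[str] = set()
--     for a in audience:
--         if a == "agent":
--             roles.add("assistant")
--         else:
--             roles.add("user")
--     if not roles:
--         roles.add("user")
--     return sorted(roles)  # deterministic: ["assistant"] or ["user"] or ["assistant", "user"]
-- ===== SOURCE B (Python) =====
-- def map_audience(audience: list[str]) -> list[str]:
--     """Map KCP audience values to MCP Role values ('user' / 'assistant')."""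
--     has_assistant = any(a == "agent" for a in audience)
--     has_user = any(a != "agent" for a in audience)
--     out = []
--     if has_assistant:
--         out.append("assistant")
--     if has_user or not audience:
--         out.append("user")
--     return out
-- ===== Notes on version B (the rewrite author's own statement) =====
-- stated objective: simpler
-- what changed: Replaces the set accumulation plus sorted() with two any() predicates and direct construction of the result in alphabetical order, with no set and no sort.
import Mathlib
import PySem

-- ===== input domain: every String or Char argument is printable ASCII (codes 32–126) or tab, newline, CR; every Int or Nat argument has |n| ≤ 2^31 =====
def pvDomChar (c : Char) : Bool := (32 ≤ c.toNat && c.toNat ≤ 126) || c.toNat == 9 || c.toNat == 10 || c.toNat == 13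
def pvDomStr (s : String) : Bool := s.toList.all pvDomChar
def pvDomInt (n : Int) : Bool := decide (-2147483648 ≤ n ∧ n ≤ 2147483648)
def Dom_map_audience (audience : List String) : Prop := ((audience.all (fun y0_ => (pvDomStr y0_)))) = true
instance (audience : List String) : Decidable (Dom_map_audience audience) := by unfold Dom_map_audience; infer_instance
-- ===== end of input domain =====

-- B replaces the set accumulation + sorted() with two any() scans and direct construction in alphabetical order (simpler).


-- ===== PORT A =====
def map_audience (audience : List String) : List String :=
  let roles : PySem.Set String :=
    audience.foldl (fun roles a =>
      if a == "agent" then PySem.Set.add roles "assistant"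
      else PySem.Set.add roles "user") PySem.Set.empty
  let roles := if roles.isEmpty then PySem.Set.add roles "user" else roles
  PySem.List.sorted roles (fun x => x) false

-- ===== PORT B =====
def map_audience_alt (audience : List String) : List String :=
  let hasAssistant := audience.any (fun a => a == "agent")
  let hasUser := audience.any (fun a => a != "agent")
  (if hasAssistant then ["assistant"] else []) ++
    (if hasUser || audience.isEmpty then ["user"] else [])

-- ===== PRECONDITION & SPEC =====
def Spec_map_audience (audience : List String) (out : List String) : Prop := out = map_audience_alt audience
instance (audience : List String) (out : List String) : Decidable (Spec_map_audience audience out) := by unfold Spec_map_audience; infer_instance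

-- ===== CLAIM (what is proved, stated in full; the proofs are below) =====
def Claim_equal_map_audience : Prop := ∀ (audience : List String), Dom_map_audience audience → Spec_map_audience audience (map_audience audience)

-- ===== LEMMAS AND PROOFS =====

-- the loop body of A's fold
def pvStep (s : PySem.Set String) (a : String) : PySem.Set String :=
  if a == "agent" then PySem.Set.add s "assistant" else PySem.Set.add s "user"

-- the five lists the accumulator can ever be
def pvFive : List (List String) :=
  [[], ["assistant"], ["user"], ["assistant", "user"], ["user", "assistant"]]

lemma pvStep_five (s : List String) (a : String) (hs : s ∈ pvFive) :
    List.foldl pvStep s [a] ∈ pvFive := by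
  simp only [List.foldl, pvStep]
  fin_cases hs <;> split <;> simp [PySem.Set.add, pvFive, PySem.Set.contains]

lemma pvFold_five (l : List String) (s : List String) (hs : s ∈ pvFive) :
    List.foldl pvStep s l ∈ pvFive := by
  induction l generalizing s with
  | nil => exact hs
  | cons a t ih => exact ih _ (pvStep_five s a hs)

lemma pvFold_mem_assistant (l : List String) (s : List String) :
    ("assistant" ∈ List.foldl pvStep s l) ↔
      ("assistant" ∈ s ∨ l.any (fun a => a == "agent") = true) := by
  induction l generalizing s with
  | nil => simp
  | cons a t ih =>
    simp only [List.foldl, List.any_cons, pvStep]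
    rw [ih]
    by_cases h : a = "agent" <;>
      simp [h, PySem.Set.mem_add, or_comm]

lemma pvFold_mem_user (l : List String) (s : List String) :
    ("user" ∈ List.foldl pvStep s l) ↔
      ("user" ∈ s ∨ l.any (fun a => a != "agent") = true) := by
  induction l generalizing s with
  | nil => simp
  | cons a t ih =>
    simp only [List.foldl, List.any_cons, pvStep]
    rw [ih]
    by_cases h : a = "agent" <;>
      simp [h, PySem.Set.mem_add, or_comm]

lemma pv_empty_of_no_any (l : List String)
    (hA : l.any (fun a => a == "agent") = false)
    (hU : l.any (fun a => a != "agent") = false) : l = [] := by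
  cases l with
  | nil => rfl
  | cons a t =>
    simp only [List.any_cons, Bool.or_eq_false_iff] at hA hU
    by_cases h : a = "agent" <;> simp [h] at hA hU

lemma pv_sorted_single (x : String) :
    PySem.List.sorted [x] (fun y => y) false = [x] := by
  apply PySem.List.sorted_eq_self_of_pairwise; simp

lemma pv_sorted_au :
    PySem.List.sorted ["assistant", "user"] (fun y => y) false = ["assistant", "user"] :=
  PySem.List.sorted_eq_of_perm_of_pairwise_lt _ _ _ (List.Perm.refl _) (by simp [String.lt_iff_toList_lt]; decide)

lemma pv_sorted_ua :
    PySem.List.sorted ["user", "assistant"] (fun y => y) false = ["assistant", "user"] :=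
  PySem.List.sorted_eq_of_perm_of_pairwise_lt _ _ _ (List.Perm.swap _ _ _) (by simp [String.lt_iff_toList_lt]; decide)

theorem map_audience_spec : Claim_equal_map_audience := by
  intro audience _
  unfold Spec_map_audience map_audience map_audience_alt
  have hfold : audience.foldl (fun roles a =>
      if a == "agent" then PySem.Set.add roles "assistant"
      else PySem.Set.add roles "user") PySem.Set.empty
      = List.foldl pvStep [] audience := rfl
  rw [hfold]
  have h5 := pvFold_five audience [] (by simp [pvFive])
  have hA := pvFold_mem_assistant audience []
  have hU := pvFold_mem_user audience []
  simp only [List.not_mem_nil, false_or] at hA hU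
  simp only [pvFive, List.mem_cons, List.not_mem_nil, or_false] at h5
  generalize hr : List.foldl pvStep [] audience = r at *
  cases hcA : audience.any (fun a => a == "agent") <;>
    cases hcU : audience.any (fun a => a != "agent") <;>
      rw [hcA] at hA <;> rw [hcU] at hU
  · -- both false: audience = []
    have he := pv_empty_of_no_any audience hcA hcU
    subst he
    simp only [List.foldl] at hr
    subst hr
    simp [PySem.Set.add, PySem.Set.contains, pv_sorted_single]
  · -- no agent, some non-agent: r = ["user"]
    have hne : audience ≠ [] := by rintro rfl; simp at hcU
    rcases h5 with rfl | rfl | rfl | rfl | rfl <;> simp_all [pv_sorted_single]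
  · -- some agent, no non-agent: r = ["assistant"]
    have hne : audience ≠ [] := by rintro rfl; simp at hcA
    rcases h5 with rfl | rfl | rfl | rfl | rfl <;> simp_all [pv_sorted_single]
  · -- both present
    have hne : audience ≠ [] := by rintro rfl; simp at hcA
    rcases h5 with rfl | rfl | rfl | rfl | rfl <;>
      simp_all [pv_sorted_au, pv_sorted_ua]
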